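-- pv_equiv track=rewrite | github.com/Daniel009891/brilliant-blackjack | run.py | computer_ace_values
-- ===== SOURCE A (Python) =====
-- def computer_ace_values(computer_cards):
--     """
--     Analizes the computers cards for aces if score is
--     greater than 21 and changes one ace value from
--     high(11) to low(1) whilever the score remains
--     higher than 21.
--     """
--     computer_score = sum(computer_cards.values())
--     if computer_score > 21:
--         for key, value in computer_cards.items():
--             if "Ace" in key and value == 11:
--                 updated_value = {key: 1}
--                 computer_cards.update(updated_value)
--                 update_score = sum(computer_cards.values())
--                 if update_score > 21:
--                     continue
--                 else:
--                     computer_score = update_score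
--                     break
--     return computer_score
-- ===== SOURCE B (Python) =====
-- def computer_ace_values(computer_cards):
--     """Closed-form: count the soft aces and compute arithmetically how many
--     demotions are needed (ceil((score-21)/10)); no sequential demote-and-check
--     loop.  Mutates computer_cards exactly as the original does."""
--     score = sum(computer_cards.values())
--     if score <= 21:
--         return score
--     soft_aces = [k for k, v in computer_cards.items()
--                  if "Ace" in k and v == 11]
--     need = -((21 - score) // 10)  # ceil((score - 21) / 10)
--     # same side effect as A: demotes aces until success, or all on fall-through
--     for k in soft_aces[:need] if need <= len(soft_aces) else soft_aces:
--         computer_cards[k] = 1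
--     if need <= len(soft_aces):
--         return score - 10 * need
--     return score
-- ===== Notes on version B (the rewrite author's own statement) =====
-- stated objective: alternative
-- what changed: Replaces A's sequential demote-one-ace-then-re-sum-and-test loop with a closed-form computation: count the soft (value-11) aces once, compute the required number of demotions as ceil((score-21)/10) by integer arithmetic, and return score-10*need if enough aces exist, else the original score.
import Mathlib
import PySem

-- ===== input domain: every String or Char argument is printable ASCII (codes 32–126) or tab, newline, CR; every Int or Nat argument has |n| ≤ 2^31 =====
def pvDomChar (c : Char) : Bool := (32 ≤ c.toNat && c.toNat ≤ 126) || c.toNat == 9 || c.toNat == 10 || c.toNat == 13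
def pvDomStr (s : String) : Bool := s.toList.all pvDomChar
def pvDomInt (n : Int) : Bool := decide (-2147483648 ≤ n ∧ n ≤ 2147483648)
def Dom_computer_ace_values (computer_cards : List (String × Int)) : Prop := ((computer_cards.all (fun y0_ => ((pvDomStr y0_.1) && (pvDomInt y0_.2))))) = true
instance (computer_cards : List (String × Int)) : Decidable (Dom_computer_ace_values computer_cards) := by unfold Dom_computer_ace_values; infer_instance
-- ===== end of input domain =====

-- B replaces A's sequential demote-one-ace-then-re-sum loop with a closed-form
-- computation (count soft aces, ceiling division gives the number of demotions);
-- only the RETURN value is proved equal — both Pythons mutate the dict identically.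

-- ===== PORT A =====
-- A's loop: carries the evolving dict, re-sums all values after each ace demotion.
def aceLoopA (d : PySem.Dict String Int) (rest : List (String × Int)) (score : Int) : Int :=
  match rest with
  | [] => score
  | (k, v) :: t =>
    if PySem.Str.isIn "Ace" k && v == 11 then
      let d' := d.insert k 1
      let us := d'.values.sum
      if us > 21 then aceLoopA d' t score else us
    else aceLoopA d t score

def computer_ace_values (computer_cards : List (String × Int)) : Int :=
  let d := PySem.Dict.ofList computer_cards
  let score := d.values.sum
  if score > 21 then aceLoopA d d.items score else score

-- ===== PORT B =====
-- Source B's dict-mutation loop has no effect on the return value and is not ported.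
def computer_ace_values_alt (computer_cards : List (String × Int)) : Int :=
  let d := PySem.Dict.ofList computer_cards
  let score := d.values.sum
  if score ≤ 21 then score
  else
    let softAces := d.items.filter (fun p => PySem.Str.isIn "Ace" p.1 && p.2 == 11)
    let need := -(PySem.Int.floordiv (21 - score) 10)
    if need ≤ (softAces.length : Int) then score - 10 * need else score

-- ===== PRECONDITION & SPEC =====
def Spec_computer_ace_values (computer_cards : List (String × Int)) (out : Int) : Prop := out = computer_ace_values_alt computer_cards
instance (computer_cards : List (String × Int)) (out : Int) : Decidable (Spec_computer_ace_values computer_cards out) := by unfold Spec_computer_ace_values; infer_instance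

-- ===== CLAIM =====
def Claim_equal_computer_ace_values : Prop := ∀ (computer_cards : List (String × Int)), Dom_computer_ace_values computer_cards → Spec_computer_ace_values computer_cards (computer_ace_values computer_cards)

-- ===== LEMMAS AND PROOFS =====

-- List core of the sum update: replacing the unique entry for k by 1.
lemma sum_snd_map_replace (l : List (String × Int)) (k : String) (v : Int)
    (hk : (l.map Prod.fst).Nodup) (hmem : (k, v) ∈ l) :
    ((l.map (fun p => if (p.1 == k) = true then (k, (1 : Int)) else p)).map Prod.snd).sum
      = (l.map Prod.snd).sum - v + 1 := by
  induction l with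
  | nil => cases hmem
  | cons p t ih =>
    obtain ⟨a, b⟩ := p
    simp only [List.map_cons, List.sum_cons]
    rcases List.mem_cons.mp hmem with h | h
    · have hka : k = a := congrArg Prod.fst h
      have hvb : v = b := congrArg Prod.snd h
      subst hka hvb
      simp only [beq_self_eq_true, if_true]
      have heq : (t.map (fun q => if (q.1 == k) = true then (k, (1 : Int)) else q)) = t := by
        conv_rhs => rw [← List.map_id t]
        apply List.map_congr_left
        intro q hq
        have hqk : q.1 ∈ t.map Prod.fst := List.mem_map_of_mem (f := Prod.fst) hq
        have hne : q.1 ≠ k := by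
          intro he
          rw [he] at hqk
          exact (List.nodup_cons.mp hk).1 hqk
        simp [hne]
      rw [heq]
      ring
    · have hqk : k ∈ t.map Prod.fst := List.mem_map_of_mem (f := Prod.fst) h
      have hp1 : a ≠ k := by
        intro he
        rw [← he] at hqk
        exact (List.nodup_cons.mp hk).1 hqk
      rw [if_neg (by simp [hp1])]
      rw [ih (List.nodup_cons.mp hk).2 h]
      ring

-- Replacing the (unique) entry for k by 1 changes the value sum from v to 1.
lemma sum_values_insert_one (d : PySem.Dict String Int) (k : String) (v : Int)
    (hnd : d.keys.Nodup) (hv : d.get? k = some v) :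
    (d.insert k 1).values.sum = d.values.sum - v + 1 := by
  have hmem : (k, v) ∈ d.items := PySem.Dict.mem_items_of_get?_eq_some d hv
  have hcon : d.contains k = true := by
    rw [PySem.Dict.contains_eq_isSome_get? d k, hv]; rfl
  show ((d.insert k 1).items.map Prod.snd).sum = (d.items.map Prod.snd).sum - v + 1
  rw [PySem.Dict.items_insert_of_contains d (1 : Int) hcon]
  exact sum_snd_map_replace d.items k v hnd hmem

-- A's sequential demotion loop computes the closed form: if the number of
-- demotions needed (ceil((sum-21)/10), here -((21-sum)/10) with Int ediv) is
-- at most the number of soft aces remaining, it returns sum - 10*need, else score.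
lemma loopA_closed (rest : List (String × Int)) (d : PySem.Dict String Int) (score : Int)
    (hnd : d.keys.Nodup) (hmap : (rest.map Prod.fst).Nodup)
    (hmem : ∀ p ∈ rest, d.get? p.1 = some p.2)
    (hgt : d.values.sum > 21) :
    aceLoopA d rest score =
      (if -((21 - d.values.sum) / 10) ≤
          (rest.countP (fun p => PySem.Str.isIn "Ace" p.1 && p.2 == 11) : Int)
        then d.values.sum - 10 * (-((21 - d.values.sum) / 10))
        else score) := by
  induction rest generalizing d with
  | nil =>
    simp only [aceLoopA, List.countP_nil, Nat.cast_zero]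
    rw [if_neg (by omega)]
  | cons p t ih =>
    obtain ⟨k, v⟩ := p
    rw [aceLoopA]
    by_cases hc : (PySem.Str.isIn "Ace" k && v == 11) = true
    · simp only [hc, if_true]
      have hv11 : v = 11 := beq_iff_eq.mp ((Bool.and_eq_true _ _).mp hc).2
      have hget : d.get? k = some v := hmem (k, v) (List.mem_cons_self ..)
      have hsum : (d.insert k 1).values.sum = d.values.sum - 10 := by
        rw [sum_values_insert_one d k v hnd hget, hv11]; ring
      have hcount : (List.countP (fun p => PySem.Str.isIn "Ace" p.1 && p.2 == 11) ((k, v) :: t))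
          = (List.countP (fun p => PySem.Str.isIn "Ace" p.1 && p.2 == 11) t) + 1 := by
        rw [List.countP_cons, if_pos hc]
      set s := d.values.sum with hs
      by_cases h21 : s - 10 > 21
      · rw [hsum, if_pos h21]
        have hin : ∀ q ∈ t, (d.insert k 1).get? q.1 = some q.2 := by
          intro q hq
          have hqk : q.1 ∈ t.map Prod.fst := List.mem_map_of_mem (f := Prod.fst) hq
          have hne : q.1 ≠ k := by
            intro he
            rw [he] at hqk
            exact (List.nodup_cons.mp hmap).1 hqk
          rw [PySem.Dict.get?_insert_of_ne d (v := 1) hne]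
          exact hmem q (List.mem_cons_of_mem _ hq)
        have ihh := ih (d.insert k 1) (PySem.Dict.nodup_keys_insert d k 1 hnd)
          (List.nodup_cons.mp hmap).2 hin (by rw [hsum]; omega)
        rw [ihh, hsum, hcount]
        have hneed : -((21 - (s - 10)) / 10) = -((21 - s) / 10) - 1 := by omega
        rw [hneed]
        push_cast
        by_cases hle : -((21 - s) / 10) - 1 ≤ ((List.countP (fun p => PySem.Str.isIn "Ace" p.1 && p.2 == 11) t) : Int)
        · rw [if_pos hle, if_pos (by omega)]
          ring
        · rw [if_neg hle, if_neg (by omega)]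
      · rw [hsum, if_neg h21, hcount]
        have hneed : -((21 - s) / 10) = 1 := by omega
        rw [hneed]
        rw [if_pos (by push_cast; omega)]
        ring
    · simp only [hc]
      have hcount : (List.countP (fun p => PySem.Str.isIn "Ace" p.1 && p.2 == 11) ((k, v) :: t))
          = (List.countP (fun p => PySem.Str.isIn "Ace" p.1 && p.2 == 11) t) := by
        rw [List.countP_cons, if_neg hc]; simp
      rw [hcount]
      exact ih d hnd (List.nodup_cons.mp hmap).2
        (fun q hq => hmem q (List.mem_cons_of_mem _ hq)) hgt

-- ===== VERDICT =====
theorem computer_ace_values_spec : Claim_equal_computer_ace_values := by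
  intro cc _
  show computer_ace_values cc = computer_ace_values_alt cc
  rw [computer_ace_values, computer_ace_values_alt]
  set d := PySem.Dict.ofList cc with hd
  by_cases h : d.values.sum > 21
  · rw [if_pos h, if_neg (by omega)]
    have hnd : d.keys.Nodup := PySem.Dict.nodup_keys_ofList cc
    rw [loopA_closed d.items d d.values.sum hnd hnd
      (fun p hp => PySem.Dict.get?_of_mem_items d (k := p.1) (v := p.2) hp hnd) h]
    rw [PySem.Int.floordiv_eq_ediv_of_pos (by norm_num)]
    rw [List.countP_eq_length_filter]
  · rw [if_neg h, if_pos (by omega)]
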